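-- pv_equiv track=rewrite | github.com/marticardoso/AMMM.Project | GRASP/Decoders/DECODER_1_2.py | CheckMaxConsecutive
-- ===== SOURCE A (Python) =====
-- def CheckMaxConsecutive(schedule, maxConsec):
--     consec = 0
--     for i in range(len(schedule)):
--         if(schedule[i]==1):
--             consec +=1
--             if(consec > maxConsec):
--                 return False
--         else:
--             consec = 0
--     return(True)
-- ===== SOURCE B (Python) =====
-- def CheckMaxConsecutive(schedule, maxConsec):
--     i, n = 0, len(schedule)
--     while i < n:
--         if schedule[i] == 1:
--             j = i
--             while j < n and schedule[j] == 1: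
--                 j += 1
--             if j - i > maxConsec:
--                 return False
--             i = j
--         else:
--             i += 1
--     return True
-- ===== Notes on version B (the rewrite author's own statement) =====
-- stated objective: alternative
-- what changed: Replaces the running-counter single scan with a run-based traversal: an outer loop jumps to the end of each maximal run of 1s (inner scan) and compares the whole run length to maxConsec.
import Mathlib
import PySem

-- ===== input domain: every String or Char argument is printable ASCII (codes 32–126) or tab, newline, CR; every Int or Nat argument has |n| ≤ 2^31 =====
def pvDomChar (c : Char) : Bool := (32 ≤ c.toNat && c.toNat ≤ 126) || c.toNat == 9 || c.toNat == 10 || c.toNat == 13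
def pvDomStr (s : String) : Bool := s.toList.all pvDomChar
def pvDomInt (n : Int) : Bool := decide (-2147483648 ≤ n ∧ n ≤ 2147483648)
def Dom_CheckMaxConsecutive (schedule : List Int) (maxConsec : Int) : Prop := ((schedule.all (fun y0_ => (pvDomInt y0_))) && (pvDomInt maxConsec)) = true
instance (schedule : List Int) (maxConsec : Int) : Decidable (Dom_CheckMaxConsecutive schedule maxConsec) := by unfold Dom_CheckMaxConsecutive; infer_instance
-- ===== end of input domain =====

-- B is an alternative run-based implementation (same O(n) cost, different decomposition);
-- return values proved equal on all inputs.

-- ===== PORT A =====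
-- A: single scan with a running counter, early False when the counter exceeds maxConsec.
def pvAGo (m : Int) : List Int → Int → Bool
  | [], _ => true
  | x :: xs, c =>
    if x = 1 then
      if c + 1 > m then false else pvAGo m xs (c + 1)
    else pvAGo m xs 0

def CheckMaxConsecutive (schedule : List Int) (maxConsec : Int) : Bool :=
  pvAGo maxConsec schedule 0

-- ===== PORT B =====
-- length of the leading run of 1s (B's inner while loop)
def pvOnesRun : List Int → Nat
  | [] => 0
  | x :: xs => if x = 1 then pvOnesRun xs + 1 else 0

-- B: outer loop over maximal runs of 1s; each run's full length is compared to maxConsec.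
def pvBGo (m : Int) : List Int → Bool
  | [] => true
  | x :: xs =>
    if x = 1 then
      if ((1 + pvOnesRun xs : Nat) : Int) > m then false
      else pvBGo m (xs.drop (pvOnesRun xs))
    else pvBGo m xs
termination_by l => l.length
decreasing_by
  all_goals simp [List.length_drop]

def CheckMaxConsecutive_alt (schedule : List Int) (maxConsec : Int) : Bool :=
  pvBGo maxConsec schedule

-- ===== PRECONDITION & SPEC =====
def Spec_CheckMaxConsecutive (schedule : List Int) (maxConsec : Int) (out : Bool) : Prop := out = CheckMaxConsecutive_alt schedule maxConsec
instance (schedule : List Int) (maxConsec : Int) (out : Bool) : Decidable (Spec_CheckMaxConsecutive schedule maxConsec out) := by unfold Spec_CheckMaxConsecutive; infer_instance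

-- ===== CLAIM (what is proved, stated in full; the proofs are below) =====
def Claim_equal_CheckMaxConsecutive : Prop := ∀ (schedule : List Int) (maxConsec : Int), Dom_CheckMaxConsecutive schedule maxConsec → Spec_CheckMaxConsecutive schedule maxConsec (CheckMaxConsecutive schedule maxConsec)

-- ===== LEMMAS AND PROOFS =====

@[simp] lemma pvBGo_nil (m : Int) : pvBGo m [] = true := by
  rw [pvBGo.eq_def]

lemma pvBGo_cons (m : Int) (x : Int) (xs : List Int) :
    pvBGo m (x :: xs) =
      if x = 1 then
        if ((1 + pvOnesRun xs : Nat) : Int) > m then false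
        else pvBGo m (xs.drop (pvOnesRun xs))
      else pvBGo m xs := by
  rw [pvBGo.eq_def]

-- A's scan over a list whose head is 1: the whole leading run is consumed,
-- returning false iff c + (run length) exceeds m, then restarting at 0.
lemma pvAGo_run (m : Int) : ∀ (l : List Int) (c : Int), l.head? = some 1 →
    pvAGo m l c =
      if c + (pvOnesRun l : Int) > m then false
      else pvAGo m (l.drop (pvOnesRun l)) 0 := by
  intro l
  induction l with
  | nil => intro c h; simp at h
  | cons x xs ih =>
    intro c h
    simp at h
    subst h
    by_cases hxs : xs.head? = some 1
    · -- run continues into xs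
      have h1 : pvOnesRun xs ≠ 0 := by
        cases xs with
        | nil => simp at hxs
        | cons y ys => simp at hxs; simp [pvOnesRun, hxs]
      rw [show pvAGo m (1 :: xs) c = if c + 1 > m then false else pvAGo m xs (c + 1) from by
        simp [pvAGo]]
      rw [ih (c + 1) hxs]
      have : pvOnesRun ((1:Int) :: xs) = pvOnesRun xs + 1 := by simp [pvOnesRun]
      rw [this]
      simp only [List.drop_succ_cons]
      split_ifs with h2 h3 h3 <;> push_cast at * <;> first | rfl | omega
    · -- run ends here: pvOnesRun xs = 0
      have h0 : pvOnesRun xs = 0 := by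
        cases xs with
        | nil => simp [pvOnesRun]
        | cons y ys =>
          simp [pvOnesRun]
          intro hy; subst hy; simp at hxs
      have : pvOnesRun ((1:Int) :: xs) = 1 := by simp [pvOnesRun, h0]
      rw [this]
      simp only [List.drop_succ_cons, List.drop_zero] at *
      rw [show pvAGo m (1 :: xs) c = if c + 1 > m then false else pvAGo m xs (c + 1) from by
        simp [pvAGo]]
      have hreset : pvAGo m xs (c + 1) = pvAGo m xs 0 := by
        cases xs with
        | nil => simp [pvAGo]
        | cons y ys =>
          have hy : y ≠ 1 := by
            intro hy; subst hy; simp at hxs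
          simp [pvAGo, hy]
      rw [hreset]
      split_ifs with h2 h3 h3 <;> first | rfl | omega

lemma pvGo_eq (m : Int) : ∀ (n : Nat) (l : List Int), l.length ≤ n →
    pvAGo m l 0 = pvBGo m l := by
  intro n
  induction n with
  | zero =>
    intro l hl
    have : l = [] := List.eq_nil_of_length_eq_zero (Nat.le_zero.mp hl)
    subst this; simp [pvAGo]
  | succ k ih =>
    intro l hl
    cases l with
    | nil => simp [pvAGo]
    | cons x xs =>
      by_cases hx : x = 1
      · subst hx
        rw [pvAGo_run m (1 :: xs) 0 (by simp)]
        rw [pvBGo_cons]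
        have hrun : pvOnesRun ((1:Int) :: xs) = pvOnesRun xs + 1 := by simp [pvOnesRun]
        rw [hrun]
        simp only [List.drop_succ_cons]
        have hlen : (xs.drop (pvOnesRun xs)).length ≤ k := by
          simp at hl ⊢; omega
        rw [ih _ hlen]
        split_ifs with h2 h3 h3 <;> first | rfl | (push_cast at *; omega)
      · rw [show pvAGo m (x :: xs) 0 = pvAGo m xs 0 from by simp [pvAGo, hx]]
        rw [pvBGo_cons]
        simp only [if_neg hx]
        exact ih xs (by simp at hl; omega)

-- ===== VERDICT (by name: the statement is the Claim_ definition above) =====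
theorem CheckMaxConsecutive_spec : Claim_equal_CheckMaxConsecutive := by
  intro schedule maxConsec _
  unfold Spec_CheckMaxConsecutive CheckMaxConsecutive CheckMaxConsecutive_alt
  exact pvGo_eq maxConsec schedule.length schedule le_rfl
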